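-- pv_equiv track=rewrite | github.com/PolrapatCom/My-Profile | Code/Python/python/0157.py | find_md5_with_most_digits
-- ===== SOURCE A (Python) =====
-- from collections import defaultdict
--
-- def count_digits(md5):
--     """Count the occurrences of each digit (0-9) in the MD5 hash."""
--     digit_count = {str(i): 0 for i in range(10)}
--     for char in md5:
--         if char in digit_count:
--             digit_count[char] += 1
--     return digit_count
--
-- def find_md5_with_most_digits(data):
--     """Find the MD5 hash with the most occurrences of '0', then '1', etc."""
--     md5_counts = defaultdict(dict)
--
--     # Count digits for each MD5 hash
--     for key in data.keys():
--         parts = key.split(':')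
--         if len(parts) == 2:  # Ensure that there are two parts
--             md5 = parts[1]  # Extract MD5 part
--             md5_counts[md5] = count_digits(md5)
--
--     # Prepare to sort hashes by counts of digits
--     sorted_md5 = sorted(
--         md5_counts.items(),
--         key=lambda item: (
--             -item[1]['0'],
--             -item[1]['1'],
--             -item[1]['2'],
--             -item[1]['3'],
--             -item[1]['4'],
--             -item[1]['5'],
--             -item[1]['6'],
--             -item[1]['7'],
--             -item[1]['8'],
--             -item[1]['9']
--         )
--     )
--
--     # Get the first MD5 hash that meets the criteria
--     if sorted_md5:
--         best_md5 = sorted_md5[0][0]  # Extract the MD5 part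
--         return f"THCTT24{{{best_md5}}}"
--     else:
--         return "No valid MD5 hashes found."
-- ===== SOURCE B (Python) =====
-- def find_md5_with_most_digits(data):
--     """Find the MD5 hash with the most occurrences of '0', then '1', etc."""
--     md5s = [key.split(':')[1] for key in data.keys() if len(key.split(':')) == 2]
--     md5s = list(dict.fromkeys(md5s))  # distinct, first-seen order
--     if not md5s:
--         return "No valid MD5 hashes found."
--     best = min(md5s, key=lambda m: tuple(-m.count(d) for d in "0123456789"))
--     return f"THCTT24{{{best}}}"
-- ===== Notes on version B (the rewrite author's own statement) =====
-- stated objective: simpler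
-- what changed: B drops the per-hash digit-count dicts and the stable sort by a 10-tuple key, and instead collects the distinct md5 parts in first-seen order and takes min() under the same negated-count tuple key (min = head of the stable sort).
import Mathlib
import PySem

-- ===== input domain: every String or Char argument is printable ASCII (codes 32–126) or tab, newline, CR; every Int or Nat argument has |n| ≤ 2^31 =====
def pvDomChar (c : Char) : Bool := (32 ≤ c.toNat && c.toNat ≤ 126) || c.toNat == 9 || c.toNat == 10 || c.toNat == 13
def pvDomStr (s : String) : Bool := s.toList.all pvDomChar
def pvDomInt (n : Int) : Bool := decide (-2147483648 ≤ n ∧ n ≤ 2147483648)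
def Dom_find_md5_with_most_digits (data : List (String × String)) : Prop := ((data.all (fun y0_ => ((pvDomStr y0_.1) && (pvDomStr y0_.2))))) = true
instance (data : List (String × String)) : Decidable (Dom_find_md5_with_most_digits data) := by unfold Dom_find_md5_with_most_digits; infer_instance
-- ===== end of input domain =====

-- key.split(':'): sep is the nonempty literal ":", so Python's split is total; Chars.splitOn is its exact value
def pvSplitColon (s : String) : List String := (PySem.Chars.splitOn s.toList [':']).map String.ofList

-- B replaces A's build-count-dicts + stable sort by a 10-tuple key with a dedup'd list comprehension and a single
-- min() pass under the same key (same winner: min = head of the stable sort); return value only, no mutation.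

-- ===== PORT A =====

-- Python's tuple '<' on the ten (negated) digit counts, written out (Lean's Prod '<' is pointwise, not Python's);
-- the key tuples are modeled as List Int.  Exact for equal-length int tuples (ours always have length 10).
def pvLexLt : List Int → List Int → Bool
  | [], [] => false
  | [], _ :: _ => true
  | _ :: _, [] => false
  | a :: as, b :: bs => if a < b then true else if b < a then false else pvLexLt as bs

-- count_digits: Python's one-char digit strings (dict keys str(i) and the chars of md5) are modeled as Char.
def pvCountDigits (md5 : String) : PySem.Dict Char Int :=
  -- {str(i): 0 for i in range(10)}  (str(i) for 0 ≤ i < 10 is the single digit character)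
  let init : PySem.Dict Char Int :=
    (PySem.List.pyRange 0 10 1).foldl (fun d i => d.insert (Char.ofNat (48 + i.toNat)) 0) PySem.Dict.empty
  md5.toList.foldl (fun d c =>
    if d.contains c then d.modify c 0 (· + 1) else d) init

-- the sort key lambda: tuple of the ten negated counts (item[1][str(i)] always present)
def pvKeyA (it : String × PySem.Dict Char Int) : List Int :=
  [-(it.2.getD '0' 0), -(it.2.getD '1' 0), -(it.2.getD '2' 0), -(it.2.getD '3' 0), -(it.2.getD '4' 0),
   -(it.2.getD '5' 0), -(it.2.getD '6' 0), -(it.2.getD '7' 0), -(it.2.getD '8' 0), -(it.2.getD '9' 0)]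

def find_md5_with_most_digits (data : List (String × String)) : String :=
  -- for key in data.keys(): duplicate keys of the assoc list collapse in the dict and the overwriting insert absorbs them
  let md5_counts : PySem.Dict String (PySem.Dict Char Int) :=
    (data.map (·.1)).foldl (fun d key =>
      let parts := pvSplitColon key
      if parts.length == 2 then
        let md5 := parts.getD 1 ""   -- parts[1]; in range under the guard
        d.insert md5 (pvCountDigits md5)
      else d) PySem.Dict.empty
  -- sorted(md5_counts.items(), key=…): PySem's stable insertion-sort model with the tuple key compared by pvLexLt
  let sorted_md5 :=
    md5_counts.items.foldl (fun acc it => PySem.List.insertBy (fun a b => pvLexLt (pvKeyA a) (pvKeyA b)) it acc) []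
  match sorted_md5 with
  | [] => "No valid MD5 hashes found."
  | best :: _ => "THCTT24{" ++ best.1 ++ "}"

-- ===== PORT B =====

-- the min() key lambda: tuple(-m.count(d) for d in "0123456789")
def pvKeyB (m : String) : List Int :=
  ("0123456789".toList).map (fun d => -((PySem.Str.count m (String.ofList [d]) : Int)))

def find_md5_with_most_digits_alt (data : List (String × String)) : String :=
  let md5s0 := ((data.map (·.1)).filter (fun key => (pvSplitColon key).length == 2)).map
      (fun key => (pvSplitColon key).getD 1 "")
  let md5s := PySem.List.dedup md5s0        -- list(dict.fromkeys(md5s))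
  match md5s with
  | [] => "No valid MD5 hashes found."
  | m :: rest =>
      -- min(md5s, key=…): first element with minimal key; tuple key compared by pvLexLt
      "THCTT24{" ++ (rest.foldl (fun best x => if pvLexLt (pvKeyB x) (pvKeyB best) then x else best) m) ++ "}"

-- ===== PRECONDITION & SPEC =====
def Spec_find_md5_with_most_digits (data : List (String × String)) (out : String) : Prop := out = find_md5_with_most_digits_alt data
instance (data : List (String × String)) (out : String) : Decidable (Spec_find_md5_with_most_digits data out) := by unfold Spec_find_md5_with_most_digits; infer_instance

-- ===== CLAIM (what is proved, stated in full; the proofs are below) =====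
def Claim_equal_find_md5_with_most_digits : Prop := ∀ (data : List (String × String)), Dom_find_md5_with_most_digits data → Spec_find_md5_with_most_digits data (find_md5_with_most_digits data)

-- ===== LEMMAS AND PROOFS =====

-- the one-step "first minimum" update (named so the folds below unify syntactically)
def pvMinStep {α : Type} (lt : α → α → Bool) (o : Option α) (x : α) : Option α :=
  match o with
  | none => some x
  | some m => if lt x m then some x else some m

-- head of the insertion-sort fold = the first-minimal fold, for ANY comparison (order-free)
theorem pv_head?_insertBy {α : Type} (before : α → α → Bool) (x : α) (a : List α) :
    (PySem.List.insertBy before x a).head? =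
      some (match a with | [] => x | y :: _ => if before x y then x else y) := by
  cases a with
  | nil => simp [PySem.List.insertBy]
  | cons y ys => by_cases h : before x y <;> simp [PySem.List.insertBy, h]

theorem pv_head?_sortfold {α : Type} (before : α → α → Bool) (xs : List α) (acc : List α) :
    (xs.foldl (fun a x => PySem.List.insertBy before x a) acc).head? =
      xs.foldl (pvMinStep before) acc.head? := by
  induction xs generalizing acc with
  | nil => rfl
  | cons x t ih =>
    simp only [List.foldl_cons]
    rw [ih, pv_head?_insertBy]
    congr 1
    cases acc with
    | nil => rfl
    | cons y ys => exact apply_ite some _ _ _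

-- the min-fold over a mapped list is the mapped min-fold (comparisons commute with the map)
theorem pv_minfold_map {α β : Type} (h : α → β) (ltb : β → β → Bool) (lta : α → α → Bool)
    (hc : ∀ x y, ltb (h x) (h y) = lta x y) (l : List α) (o : Option α) :
    (l.map h).foldl (pvMinStep ltb) (o.map h) = (l.foldl (pvMinStep lta) o).map h := by
  induction l generalizing o with
  | nil => rfl
  | cons x t ih =>
    simp only [List.map_cons, List.foldl_cons]
    cases o with
    | none => simpa [pvMinStep] using ih (some x)
    | some m =>
      simp only [Option.map_some, pvMinStep, hc]
      by_cases hxm : lta x m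
      · simp only [if_pos hxm]; simpa using ih (some x)
      · simp only [if_neg hxm]; simpa using ih (some m)

-- the min-fold started at some b is the plain running-min fold
theorem pv_minfold_some {α : Type} (lt : α → α → Bool) (l : List α) (b : α) :
    l.foldl (pvMinStep lt) (some b) =
      some (l.foldl (fun best x => if lt x best then x else best) b) := by
  induction l generalizing b with
  | nil => rfl
  | cons x t ih => by_cases h : lt x b <;> simp [pvMinStep, h, ih]

-- items of the insert-value-determined-by-key fold: the dedup'd keys paired with their values
theorem pv_items_fold_insert {ν : Type} (g : String → ν) (ms : List String) (s : PySem.Set String) :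
    ((ms.foldl (fun d m => d.insert m (g m))
        (PySem.Dict.mk (s.map (fun m => (m, g m)))))).items =
      (PySem.Set.update s ms).map (fun m => (m, g m)) := by
  induction ms generalizing s with
  | nil => rfl
  | cons m t ih =>
    simp only [List.foldl_cons, PySem.Set.update_cons]
    have hcont : (PySem.Dict.mk (s.map (fun m => (m, g m)))).contains m = decide (m ∈ s) := by
      simp [PySem.Dict.contains, List.any_map, Function.comp_def, List.any_beq']
    by_cases hm : m ∈ s
    · have h1 : (PySem.Dict.mk (s.map (fun m => (m, g m)))).insert m (g m) =
          PySem.Dict.mk (s.map (fun m => (m, g m))) := by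
        simp [PySem.Dict.insert, hcont, hm, List.map_map]
        intro a ha hae
        exact ⟨hae.symm, congrArg g hae.symm⟩
      rw [h1, PySem.Set.add_of_mem hm]
      exact ih s
    · have h1 : (PySem.Dict.mk (s.map (fun m => (m, g m)))).insert m (g m) =
          PySem.Dict.mk ((s ++ [m]).map (fun m => (m, g m))) := by
        simp [PySem.Dict.insert, hcont, hm]
      rw [h1, PySem.Set.add_of_not_mem hm]
      exact ih (s ++ [m])

-- ===== digit-count lemmas =====

theorem pv_count_go_singleton (c : Char) (l : List Char) (fuel acc : Nat) (h : l.length ≤ fuel) :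
    PySem.Chars.count.go [c] fuel l acc = acc + l.count c := by
  induction fuel generalizing l acc with
  | zero =>
    have : l = [] := List.length_eq_zero_iff.mp (Nat.le_zero.mp h)
    subst this; rfl
  | succ n ih =>
    cases l with
    | nil => rfl
    | cons x t =>
      simp only [PySem.Chars.count.go]
      by_cases hx : x = c
      · subst hx
        have hpre : List.isPrefixOf [x] (x :: t) = true := by simp [List.isPrefixOf]
        simp only [hpre, if_true, List.length_cons, List.drop_succ_cons, List.length_nil,
          List.drop_zero]
        rw [ih t (acc + 1) (by simpa using Nat.le_of_succ_le_succ h)]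
        simp
        omega
      · have hpre : List.isPrefixOf [c] (x :: t) = false := by
          simp [List.isPrefixOf]
          exact fun hh => (hx hh.symm).elim
        simp only [hpre, Bool.false_eq_true, if_false]
        rw [ih t acc (by simpa using Nat.le_of_succ_le_succ h)]
        simp [hx]

theorem pv_chars_count_singleton (c : Char) (l : List Char) :
    PySem.Chars.count l [c] = l.count c := by
  cases l with
  | nil => rfl
  | cons x t =>
    show PySem.Chars.count.go [c] (x :: t).length (x :: t) 0 = _
    rw [pv_count_go_singleton c (x :: t) (x :: t).length 0 (le_refl _)]
    simp

-- the conditional-increment fold over the chars, read back at a key present in the dict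
theorem pv_cnt_fold (cs : List Char) (d : PySem.Dict Char Int) (k : Char) (hk : d.contains k = true) :
    ((cs.foldl (fun d c => if d.contains c then d.modify c 0 (· + 1) else d) d)).getD k 0 =
      d.getD k 0 + (cs.count k : Int) := by
  induction cs generalizing d with
  | nil => simp
  | cons c t ih =>
    simp only [List.foldl_cons]
    by_cases hc : d.contains c
    · have hk' : (d.modify c 0 (· + 1)).contains k = true := by
        rw [PySem.Dict.contains_modify]; simp [hk]
      rw [if_pos hc, ih _ hk']
      by_cases hck : k = c
      · subst hck
        rw [PySem.Dict.getD_modify_self]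
        simp
        ring
      · rw [PySem.Dict.getD_modify_of_ne _ _ _ hck]
        simp [List.count_cons]
        exact fun h => hck h.symm
    · rw [if_neg hc, ih _ hk]
      have hck : ¬ k = c := fun h => hc (h ▸ hk)
      simp [List.count_cons]
      exact fun h => hck h.symm

-- the two key lambdas agree on every string
theorem pv_key_eq (m : String) : pvKeyA (m, pvCountDigits m) = pvKeyB m := by
  have hinit : ((PySem.List.pyRange 0 10 1).foldl
      (fun d i => d.insert (Char.ofNat (48 + i.toNat)) 0) PySem.Dict.empty : PySem.Dict Char Int) =
      PySem.Dict.mk [('0',0),('1',0),('2',0),('3',0),('4',0),('5',0),('6',0),('7',0),('8',0),('9',0)] := by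
    decide
  have hd : ∀ k : Char,
      (PySem.Dict.mk [('0',(0:Int)),('1',0),('2',0),('3',0),('4',0),('5',0),('6',0),('7',0),('8',0),('9',0)]).contains k = true →
      (pvCountDigits m).getD k 0 = (m.toList.count k : Int) := by
    intro k hk
    unfold pvCountDigits
    simp only [hinit]
    rw [pv_cnt_fold _ _ _ hk]
    have h0 : (PySem.Dict.mk [('0',(0:Int)),('1',0),('2',0),('3',0),('4',0),('5',0),('6',0),('7',0),('8',0),('9',0)]).getD k 0 = 0 := by
      have hk2 := hk
      simp only [PySem.Dict.contains, List.any_eq_true] at hk2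
      obtain ⟨p, hp, hpk⟩ := hk2
      rw [beq_iff_eq] at hpk
      fin_cases hp <;> (cases hpk; decide)
    rw [h0]; ring
  simp only [pvKeyA, pvKeyB]
  have hds : ("0123456789".toList) = ['0','1','2','3','4','5','6','7','8','9'] := by decide
  rw [hds]
  simp only [List.map_cons, List.map_nil]
  rw [hd '0' (by decide), hd '1' (by decide), hd '2' (by decide), hd '3' (by decide), hd '4' (by decide),
      hd '5' (by decide), hd '6' (by decide), hd '7' (by decide), hd '8' (by decide), hd '9' (by decide)]
  simp [PySem.Str.count, pv_chars_count_singleton]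

-- A's per-key parse-and-insert loop is the insert fold over the parsed md5 list
theorem pv_parse_fold (ks : List String) (d : PySem.Dict String (PySem.Dict Char Int)) :
    (ks.foldl (fun d key =>
        if (pvSplitColon key).length == 2 then
          d.insert ((pvSplitColon key).getD 1 "") (pvCountDigits ((pvSplitColon key).getD 1 ""))
        else d) d)
      = ((ks.filter (fun key => (pvSplitColon key).length == 2)).map
          (fun key => (pvSplitColon key).getD 1 "")).foldl (fun d m => d.insert m (pvCountDigits m)) d := by
  induction ks generalizing d with
  | nil => rfl
  | cons y t ih =>
    simp only [List.foldl_cons, List.filter_cons]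
    by_cases h : ((pvSplitColon y).length == 2) = true
    · simp only [h, if_true, List.map_cons, List.foldl_cons]
      exact ih _
    · simp only [Bool.not_eq_true] at h
      simp only [h, Bool.false_eq_true, if_false]
      exact ih d

-- ===== VERDICT (by name: the statement is the Claim_ definition above) =====
theorem find_md5_with_most_digits_spec : Claim_equal_find_md5_with_most_digits := by
  intro data _
  unfold Spec_find_md5_with_most_digits
  unfold find_md5_with_most_digits find_md5_with_most_digits_alt
  simp only []
  set ms : List String := ((data.map (·.1)).filter (fun key => (pvSplitColon key).length == 2)).map
      (fun key => (pvSplitColon key).getD 1 "") with hms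
  rw [pv_parse_fold (data.map (·.1))]
  -- items of the dict: the dedup'd md5s paired with their count dicts
  have hitems : (ms.foldl (fun d m => d.insert m (pvCountDigits m)) PySem.Dict.empty).items
      = (PySem.List.dedup ms).map (fun m => (m, pvCountDigits m)) := by
    have h := pv_items_fold_insert pvCountDigits ms []
    simpa [PySem.List.dedup, PySem.Set.update_nil_left] using h
  rw [hitems]
  -- head of the stable-sort fold = first-minimal fold = B's min fold, transported through the pairing map
  have hchain : (((PySem.List.dedup ms).map (fun m => (m, pvCountDigits m))).foldl
        (fun acc it => PySem.List.insertBy (fun a b => pvLexLt (pvKeyA a) (pvKeyA b)) it acc) []).head?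
      = ((PySem.List.dedup ms).foldl
          (pvMinStep (fun x y => pvLexLt (pvKeyB x) (pvKeyB y))) none).map
          (fun m => (m, pvCountDigits m)) := by
    rw [pv_head?_sortfold]
    have h := pv_minfold_map (fun m => (m, pvCountDigits m))
        (fun a b => pvLexLt (pvKeyA a) (pvKeyA b))
        (fun x y => pvLexLt (pvKeyA (x, pvCountDigits x)) (pvKeyA (y, pvCountDigits y)))
        (fun _ _ => rfl) (PySem.List.dedup ms) none
    simp only [Option.map_none, List.head?_nil] at h ⊢
    rw [h]
    simp only [pv_key_eq]
  cases hdd : PySem.List.dedup ms with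
  | nil =>
    rw [hdd] at hchain
    rfl
  | cons m rest =>
    rw [hdd] at hchain
    rw [List.foldl_cons,
        show pvMinStep (fun x y => pvLexLt (pvKeyB x) (pvKeyB y)) none m = some m from rfl,
        pv_minfold_some] at hchain
    cases hsort : ((m :: rest).map (fun m => (m, pvCountDigits m))).foldl
        (fun acc it => PySem.List.insertBy (fun a b => pvLexLt (pvKeyA a) (pvKeyA b)) it acc) [] with
    | nil =>
      rw [hsort] at hchain
      simp at hchain
    | cons b tl =>
      rw [hsort] at hchain
      simp only [List.head?_cons, Option.map_some] at hchain
      have hb : b = (rest.foldl (fun best x => if pvLexLt (pvKeyB x) (pvKeyB best) then x else best) m,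
          pvCountDigits (rest.foldl (fun best x => if pvLexLt (pvKeyB x) (pvKeyB best) then x else best) m)) := by
        injection hchain
      rw [hb]
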